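-- pv_equiv track=rewrite | github.com/miliar/Code_Jam_Webscraper | solutions_python/Problem_200/4603.py | isTidy_fast
-- ===== SOURCE A (Python) =====
-- def isTidy_fast(n):
-- 	lst = list(str(n))
-- 	lastnum = lst[0]
-- 	for num in lst:
-- 		if lastnum > num:
-- 			return False
-- 		lastnum = num
-- 	return True
-- ===== SOURCE B (Python) =====
-- def isTidy_fast(n):
-- 	s = str(n)
-- 	return s == ''.join(sorted(s))
-- ===== Notes on version B (the rewrite author's own statement) =====
-- stated objective: idiomatic
-- what changed: Replaces the explicit adjacent-pair scan with the one-line idiom s == ''.join(sorted(s)): a string's characters are non-decreasing iff the string equals its sorted self.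
import Mathlib
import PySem

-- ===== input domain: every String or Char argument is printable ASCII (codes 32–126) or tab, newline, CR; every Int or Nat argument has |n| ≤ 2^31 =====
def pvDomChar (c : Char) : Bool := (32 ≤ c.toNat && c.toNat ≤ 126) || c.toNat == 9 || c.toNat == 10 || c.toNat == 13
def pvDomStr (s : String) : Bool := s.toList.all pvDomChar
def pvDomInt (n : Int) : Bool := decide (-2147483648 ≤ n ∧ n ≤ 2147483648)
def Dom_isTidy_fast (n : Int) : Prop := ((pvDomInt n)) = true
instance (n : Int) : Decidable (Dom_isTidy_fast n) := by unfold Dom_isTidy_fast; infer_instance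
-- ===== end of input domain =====

-- B replaces A's adjacent-pair scan with "str(n) equals its sorted self"; same return value, same cost class.
-- ===== PORT A =====
-- the for-loop over lst with accumulator lastnum
def isTidyLoop (lastnum : Char) (lst : List Char) : Bool :=
  match lst with
  | [] => true
  | num :: rest => if lastnum > num then false else isTidyLoop num rest

def isTidy_fast (n : Int) : Bool :=
  let lst := (PySem.Int.toStr n).toList
  match lst with
  | [] => true  -- unreachable: str(n) is never empty
  | c0 :: _ => isTidyLoop c0 lst

-- ===== PORT B =====
def isTidy_fast_alt (n : Int) : Bool :=
  let s := (PySem.Int.toStr n).toList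
  s == PySem.List.sorted s (fun x => x) false

-- ===== PRECONDITION & SPEC =====
def Spec_isTidy_fast (n : Int) (out : Bool) : Prop := out = isTidy_fast_alt n
instance (n : Int) (out : Bool) : Decidable (Spec_isTidy_fast n out) := by unfold Spec_isTidy_fast; infer_instance

-- ===== CLAIM (what is proved, stated in full; the proofs are below) =====
def Claim_equal_isTidy_fast : Prop := ∀ (n : Int), Dom_isTidy_fast n → Spec_isTidy_fast n (isTidy_fast n)

-- ===== LEMMAS AND PROOFS =====

-- ===== VERDICT (by name: the statement is the Claim_ definition above) =====
-- the loop accepts list l started at lastnum = c iff c :: l is a non-decreasing chain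
theorem isTidyLoop_iff (c : Char) (l : List Char) :
    isTidyLoop c l = true ↔ List.IsChain (· ≤ ·) (c :: l) := by
  induction l generalizing c with
  | nil => simp [isTidyLoop]
  | cons x rest ih =>
    rw [isTidyLoop, List.isChain_cons_cons]
    by_cases h : c > x
    · simp [h, not_le.mpr h]
    · simp [h, not_lt.mp h, ih]

theorem sorted_eq_self_iff (l : List Char) :
    (PySem.List.sorted l (fun x => x) false = l) ↔ l.Pairwise (· ≤ ·) := by
  constructor
  · intro h
    have := PySem.List.sorted_pairwise (xs := l) (key := fun x => x)
    rwa [h] at this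
  · intro h
    exact PySem.List.sorted_eq_self_of_pairwise (xs := l) (key := fun x => x) h

theorem isTidy_fast_spec : Claim_equal_isTidy_fast := by
  intro n _
  unfold Spec_isTidy_fast isTidy_fast isTidy_fast_alt
  cases hl : (PySem.Int.toStr n).toList with
  | nil => simp [hl, PySem.List.sorted]
  | cons c0 rest =>
    simp only [hl]
    rw [Bool.eq_iff_iff, beq_iff_eq]
    have hA : isTidyLoop c0 (c0 :: rest) = true ↔ (c0 :: rest).Pairwise (· ≤ ·) := by
      rw [isTidyLoop]
      simp only [gt_iff_lt, lt_irrefl, if_false]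
      rw [isTidyLoop_iff, List.isChain_iff_pairwise]
    rw [hA, ← sorted_eq_self_iff]
    exact eq_comm
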